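-- pv_equiv track=rewrite | github.com/datnvhust/GraduationThesis | bug_report/convert_txt_to_xml.py | divide_link
-- ===== SOURCE A (Python) =====
-- def divide_link(input):
--     output = []
--     link = ''
--     for i in range(len(input)):
--         if (input[i]==' ' and input[i-5:i]=='.java'):
--             output.append(link)
--             link = ''
--         else:
--             link += input[i]
--     if link[-5:]=='.java':
--         output.append(link)
--     return output
-- ===== SOURCE B (Python) =====
-- def divide_link(input):
--     # Search-based splitter: repeatedly find the next '.java ' occurrence and slice,
--     # instead of accumulating characters one by one.
--     parts = []
--     rest = input
--     while True:
--         j = rest.find('.java ')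
--         if j < 0:
--             break
--         parts.append(rest[:j + 5])
--         rest = rest[j + 6:]
--     if rest.endswith('.java'):
--         parts.append(rest)
--     return parts
-- ===== Notes on version B (the rewrite author's own statement) =====
-- stated objective: idiomatic
-- what changed: B replaces A's character-by-character accumulator loop with a substring-search splitter: repeatedly str.find the next '.java ' occurrence, slice the token off, and finally keep the tail iff it endswith '.java'.
import Mathlib
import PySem

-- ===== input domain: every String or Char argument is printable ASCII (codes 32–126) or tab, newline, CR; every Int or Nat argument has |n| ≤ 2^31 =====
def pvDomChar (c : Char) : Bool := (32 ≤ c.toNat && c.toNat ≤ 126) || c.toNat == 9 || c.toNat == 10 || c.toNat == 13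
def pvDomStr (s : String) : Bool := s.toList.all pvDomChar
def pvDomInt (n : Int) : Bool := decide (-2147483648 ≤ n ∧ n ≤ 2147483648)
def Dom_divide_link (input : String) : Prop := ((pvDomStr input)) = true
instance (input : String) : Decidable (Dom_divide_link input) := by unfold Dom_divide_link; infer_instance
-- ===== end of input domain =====

-- B replaces A's char-by-char accumulator loop with a substring-search splitter
-- (repeated find of '.java ' plus slicing); same cost, more idiomatic.

-- ===== PORT A =====
-- literal transliteration: for i in range(len(input)) with the accumulated `link`;
-- input[i] is always in range, so (pyGet? …).toList appends exactly that character.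
def divide_link (input : String) : List String :=
  let cs := input.toList
  let st := (PySem.List.pyRange 0 (cs.length : Int) 1).foldl
    (fun (st : List String × List Char) i =>
      if (PySem.List.pyGet? cs i == some ' ') &&
         (PySem.List.slice cs (some (i - 5)) (some i) == ".java".toList) then
        (st.1 ++ [String.ofList st.2], [])
      else
        (st.1, st.2 ++ (PySem.List.pyGet? cs i).toList))
    ([], [])
  if PySem.List.slice st.2 (some (-5)) none == ".java".toList then
    st.1 ++ [String.ofList st.2]
  else st.1

-- ===== PORT B =====
-- the while-loop of Source B as structural recursion on `rest` (rest strictly shrinks at each cut)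
def pvFindLen_lt (rest : List Char) (h : ¬ PySem.Chars.find rest ".java ".toList < 0) :
    (PySem.List.slice rest (some (PySem.Chars.find rest ".java ".toList + 6)) none).length < rest.length := by
  have hj0 : (0:Int) ≤ PySem.Chars.find rest ".java ".toList := by omega
  have hspec := PySem.Chars.find_spec hj0
  have hlen : 6 ≤ (rest.drop (PySem.Chars.find rest ".java ".toList).toNat).length := by
    simpa using hspec.1.length_le
  have hrl : (PySem.Chars.find rest ".java ".toList).toNat + 6 ≤ rest.length := by
    have := List.length_drop (l := rest) (i := (PySem.Chars.find rest ".java ".toList).toNat)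
    omega
  rw [PySem.List.slice_from rest (by omega : (0:Int) ≤ PySem.Chars.find rest ".java ".toList + 6),
      List.length_drop]
  omega

def divide_link_altLoop (rest : List Char) : List String :=
  if h : PySem.Chars.find rest ".java ".toList < 0 then
    if PySem.Chars.endswith rest ".java".toList then [String.ofList rest] else []
  else
    String.ofList (PySem.List.slice rest none (some (PySem.Chars.find rest ".java ".toList + 5))) ::
      divide_link_altLoop (PySem.List.slice rest (some (PySem.Chars.find rest ".java ".toList + 6)) none)
termination_by rest.length
decreasing_by exact pvFindLen_lt rest h

def divide_link_alt (input : String) : List String :=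
  divide_link_altLoop input.toList

-- ===== PRECONDITION & SPEC =====
def Spec_divide_link (input : String) (out : List String) : Prop := out = divide_link_alt input
instance (input : String) (out : List String) : Decidable (Spec_divide_link input out) := by unfold Spec_divide_link; infer_instance

-- ===== CLAIM (what is proved, stated in full; the proofs are below) =====
def Claim_equal_divide_link : Prop := ∀ (input : String), Dom_divide_link input → Spec_divide_link input (divide_link input)

-- ===== LEMMAS AND PROOFS =====

-- named copies of A's loop body and finisher (definitionally equal to the inline lambdas)
def pvCond (cs : List Char) (i : Int) : Bool :=
  (PySem.List.pyGet? cs i == some ' ') &&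
  (PySem.List.slice cs (some (i - 5)) (some i) == ".java".toList)

def pvStepA (cs : List Char) (st : List String × List Char) (i : Int) : List String × List Char :=
  if pvCond cs i then (st.1 ++ [String.ofList st.2], [])
  else (st.1, st.2 ++ (PySem.List.pyGet? cs i).toList)

def pvFinA (st : List String × List Char) : List String :=
  if PySem.List.slice st.2 (some (-5)) none == ".java".toList then st.1 ++ [String.ofList st.2] else st.1

-- l[-5:] == '.java'  is exactly  l.endswith('.java')
lemma pv_tail_eq (l : List Char) :
    (PySem.List.slice l (some (-5)) none == ".java".toList) =
    PySem.Chars.endswith l ".java".toList := by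
  rw [Bool.eq_iff_iff, beq_iff_eq, PySem.Chars.endswith_iff, List.suffix_iff_eq_drop]
  have hjv : (".java".toList).length = 5 := by decide
  rw [hjv]
  simp only [PySem.List.slice, PySem.List.clampIdx, if_pos (by omega : (-5:Int) < 0)]
  by_cases h5 : l.length < 5
  · rw [if_pos (by omega : (l.length : Int) + (-5) < 0)]
    have hn : l.length - 5 = 0 := by omega
    rw [hn]
    simp only [Nat.sub_zero, List.drop_zero, List.take_length]
    constructor <;> intro h
    · have := congrArg List.length h; rw [hjv] at this; omega
    · have := congrArg List.length h; rw [hjv] at this; omega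
  · rw [if_neg (by omega : ¬ ((l.length : Int) + (-5) < 0))]
    have h1 : ((l.length : Int) + (-5)).toNat = l.length - 5 := by omega
    rw [h1]
    have h2 : l.length - (l.length - 5) = 5 := by omega
    rw [h2]
    have h3 : (List.drop (l.length - 5) l).length ≤ 5 := by simp; omega
    rw [List.take_of_length_le h3]
    exact eq_comm

-- characterisation of A's cut condition at a position i ≥ prev, under the invariant that
-- position prev-1 (if any) holds a space: the condition fires iff '.java ' occurs at i-5 ≥ prev.
lemma pv_cond_iff (cs : List Char) (prev i : Nat)
    (hinv : prev = 0 ∨ cs[prev-1]? = some ' ') (hpi : prev ≤ i) (hin : i < cs.length) :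
    pvCond cs (i : Int) = true ↔ prev + 5 ≤ i ∧ ".java ".toList <+: cs.drop (i - 5) := by
  have hjv : (".java".toList).length = 5 := by decide
  constructor
  · intro h
    simp only [pvCond, Bool.and_eq_true, beq_iff_eq] at h
    obtain ⟨hg, hs⟩ := h
    rw [PySem.List.pyGet?_natCast] at hg
    -- i ≥ 5: otherwise the slice is too short to equal '.java'
    have h5 : 5 ≤ i := by
      by_contra hlt
      have hL := congrArg List.length hs
      rw [PySem.List.length_slice, hjv] at hL
      have hc1 : PySem.List.clampIdx cs.length (i : Int) ≤ i := by
        unfold PySem.List.clampIdx; split_ifs <;> omega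
      omega
    have hcast : (i : Int) - 5 = ((i - 5 : Nat) : Int) := by omega
    rw [hcast, PySem.List.slice_natCast] at hs
    have hsub : i - (i - 5) = 5 := by omega
    rw [hsub] at hs
    have hgi : cs[i] = ' ' := by
      rw [List.getElem?_eq_getElem hin] at hg; exact Option.some.inj hg
    have hdecomp : cs.drop (i - 5) = ".java".toList ++ cs.drop i := by
      conv_lhs => rw [← List.take_append_drop 5 (cs.drop (i-5))]
      rw [hs, List.drop_drop]
      congr 2
      omega
    have hdropi : cs.drop i = ' ' :: cs.drop (i + 1) := by
      rw [List.drop_eq_getElem_cons hin, hgi]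
    -- the invariant forbids i < prev + 5
    have hp5 : prev + 5 ≤ i := by
      rcases hinv with h0 | hsp
      · omega
      · by_contra hlt
        have hprev1 : 1 ≤ prev := by
          by_contra hp0
          have : prev = 0 := by omega
          omega
        -- position prev-1 lies in [i-5, i-1]; it is a char of '.java', never ' '
        have ht : prev - 1 - (i - 5) < 5 := by omega
        have hidx : (i - 5) + (prev - 1 - (i - 5)) = prev - 1 := by omega
        have hchar := congrArg (fun l => l[prev - 1 - (i - 5)]?) hs
        simp only [List.getElem?_take, if_pos ht, List.getElem?_drop] at hchar
        rw [hidx, hsp] at hchar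
        have hmem : (' ' : Char) ∈ ".java".toList := by
          have h5' : prev - 1 - (i - 5) < (".java".toList).length := by omega
          rw [List.getElem?_eq_getElem h5'] at hchar
          rw [← Option.some.inj hchar.symm]
          exact List.getElem_mem h5'
        exact absurd hmem (by decide)
    refine ⟨hp5, ?_⟩
    rw [hdecomp, hdropi]
    exact ⟨cs.drop (i+1), by simp⟩
  · rintro ⟨hp5, hpre⟩
    obtain ⟨tail, htail⟩ := hpre
    have hpat : ".java ".toList = ".java".toList ++ [' '] := by decide
    simp only [pvCond, Bool.and_eq_true, beq_iff_eq]
    have hcast : (i : Int) - 5 = ((i - 5 : Nat) : Int) := by omega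
    constructor
    · rw [PySem.List.pyGet?_natCast]
      have hdec : cs.drop i = [' '] ++ tail := by
        have h1 : cs.drop i = (cs.drop (i - 5)).drop 5 := by
          rw [List.drop_drop]; congr 1 <;> omega
        rw [h1, ← htail, hpat]
        simp
      have hd := congrArg (fun l => l[0]?) hdec
      simp only [List.getElem?_drop, Nat.add_zero] at hd
      simpa using hd
    · rw [hcast, PySem.List.slice_natCast]
      have hsub : i - (i - 5) = 5 := by omega
      rw [hsub, ← htail, hpat]
      simp

-- A's fold over a cut-free index interval just accumulates the characters
lemma pv_fold_no_cut (cs : List Char) : ∀ (m a : Nat) (out : List String) (link : List Char),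
    a + m ≤ cs.length →
    (∀ i : Nat, a ≤ i → i < a + m → pvCond cs (i : Int) = false) →
    (PySem.List.pyRange (a : Int) ((a + m : Nat) : Int) 1).foldl (pvStepA cs) (out, link)
      = (out, link ++ (cs.drop a).take m) := by
  intro m
  induction m with
  | zero =>
    intro a out link _ _
    have hr : PySem.List.pyRange (a : Int) ((a + 0 : Nat) : Int) 1 = [] :=
      PySem.List.pyRange_one_eq_nil (by push_cast; omega)
    rw [hr]
    simp
  | succ m ih =>
    intro a out link hle hnc
    have ha : a < cs.length := by omega
    have hlt : (a : Int) < ((a + (m+1) : Nat) : Int) := by push_cast; omega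
    rw [PySem.List.pyRange_one_cons hlt, List.foldl_cons]
    have hstep : pvStepA cs (out, link) (a : Int) = (out, link ++ [cs[a]]) := by
      unfold pvStepA
      rw [hnc a (le_refl a) (by omega), if_neg Bool.false_ne_true]
      rw [PySem.List.pyGet?_natCast, List.getElem?_eq_getElem ha]
      rfl
    rw [hstep]
    have hcast : (a : Int) + 1 = ((a + 1 : Nat) : Int) := by push_cast; ring
    have hcast2 : ((a + (m+1) : Nat) : Int) = (((a+1) + m : Nat) : Int) := by push_cast; ring
    rw [hcast, hcast2]
    rw [ih (a+1) out (link ++ [cs[a]]) (by omega) (fun i h1 h2 => hnc i (by omega) (by omega))]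
    rw [List.drop_eq_getElem_cons ha, List.take_succ_cons]
    simp

-- main invariant: A's scan from position prev (fresh link) produces out ++ B's splitter on cs.drop prev
lemma pv_main (cs : List Char) : ∀ (m prev : Nat) (out : List String),
    m = cs.length - prev → prev ≤ cs.length →
    (prev = 0 ∨ cs[prev-1]? = some ' ') →
    pvFinA ((PySem.List.pyRange (prev : Int) (cs.length : Int) 1).foldl (pvStepA cs) (out, []))
      = out ++ divide_link_altLoop (cs.drop prev) := by
  intro m
  induction m using Nat.strong_induction_on with
  | _ m ih =>
    intro prev out hm hpl hinv
    by_cases hf : PySem.Chars.find (cs.drop prev) ".java ".toList < 0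
    · -- no occurrence: the loop only accumulates, the tail test decides
      have hno : ¬ ".java ".toList <:+: cs.drop prev := by
        have hge := PySem.Chars.neg_one_le_find (s := cs.drop prev) (sub := ".java ".toList)
        have heq : PySem.Chars.find (cs.drop prev) ".java ".toList = -1 := by omega
        exact (PySem.Chars.find_eq_neg_one_iff _ _).mp heq
      have hnc : ∀ i : Nat, prev ≤ i → i < cs.length → pvCond cs (i : Int) = false := by
        intro i h1 h2
        by_contra hc
        have hc' : pvCond cs (i : Int) = true := by
          cases h : pvCond cs (i : Int) with
          | false => exact absurd h hc
          | true => rfl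
        obtain ⟨hp5, hpre⟩ := (pv_cond_iff cs prev i hinv h1 h2).mp hc'
        apply hno
        have hdr : cs.drop (i - 5) = (cs.drop prev).drop (i - 5 - prev) := by
          rw [List.drop_drop]; congr 1 <;> omega
        rw [hdr] at hpre
        exact (PySem.Chars.isIn_iff_infix _ _).mp
          ((PySem.Chars.exists_prefix_drop_iff_isIn _ _).mp ⟨_, hpre⟩)
      have hsplit : ((cs.length : Int)) = ((prev + (cs.length - prev) : Nat) : Int) := by
        push_cast; omega
      rw [hsplit, pv_fold_no_cut cs (cs.length - prev) prev out [] (by omega)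
            (fun i ha hb => hnc i ha (by omega))]
      have htake : (cs.drop prev).take (cs.length - prev) = cs.drop prev := by
        apply List.take_of_length_le
        simp
      rw [List.nil_append, htake]
      rw [divide_link_altLoop.eq_def, dif_pos hf]
      simp only [pvFinA]
      rw [pv_tail_eq]
      cases hbe : PySem.Chars.endswith (cs.drop prev) ".java".toList <;> simp
    · -- an occurrence at local index j: one cut, then recurse
      set j := PySem.Chars.find (cs.drop prev) ".java ".toList with hj
      have hj0 : 0 ≤ j := by omega
      have hspec := PySem.Chars.find_spec (s := cs.drop prev) (sub := ".java ".toList) hj0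
      obtain ⟨hpre, hmin⟩ := hspec
      have hplen : 6 ≤ ((cs.drop prev).drop j.toNat).length := by
        simpa using hpre.length_le
      have hjb : j.toNat + 6 ≤ (cs.drop prev).length := by
        have := List.length_drop (l := cs.drop prev) (i := j.toNat); omega
      have hrl : (cs.drop prev).length = cs.length - prev := by simp
      have hcut : prev + j.toNat + 5 < cs.length := by omega
      -- cond is false on [prev, prev+j.toNat+5)
      have hnc : ∀ i : Nat, prev ≤ i → i < prev + j.toNat + 5 → pvCond cs (i : Int) = false := by
        intro i h1 h2
        by_contra hc
        have hc' : pvCond cs (i : Int) = true := by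
          cases h : pvCond cs (i : Int) with
          | false => exact absurd h hc
          | true => rfl
        obtain ⟨hp5, hpre'⟩ := (pv_cond_iff cs prev i hinv h1 (by omega)).mp hc'
        have hdr : cs.drop (i - 5) = (cs.drop prev).drop (i - 5 - prev) := by
          rw [List.drop_drop]; congr 1 <;> omega
        rw [hdr] at hpre'
        exact hmin (i - 5 - prev) (by omega) hpre'
      -- cond is true at i0 = prev + j.toNat + 5
      have hct : pvCond cs ((prev + j.toNat + 5 : Nat) : Int) = true := by
        apply (pv_cond_iff cs prev (prev + j.toNat + 5) hinv (by omega) hcut).mpr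
        refine ⟨by omega, ?_⟩
        have hdr : cs.drop (prev + j.toNat + 5 - 5) = (cs.drop prev).drop j.toNat := by
          rw [List.drop_drop]; congr 1 <;> omega
        rw [hdr]
        exact hpre
      -- split the range [prev, len) = [prev, i0) ++ [i0] ++ [i0+1, len)
      have hs1 : PySem.List.pyRange (prev : Int) (cs.length : Int) 1
          = PySem.List.pyRange (prev : Int) ((prev + (j.toNat + 5) : Nat) : Int) 1
            ++ PySem.List.pyRange ((prev + (j.toNat + 5) : Nat) : Int) (cs.length : Int) 1 := by
        apply PySem.List.pyRange_one_append <;> push_cast <;> omega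
      have hs2 : PySem.List.pyRange ((prev + (j.toNat + 5) : Nat) : Int) (cs.length : Int) 1
          = ((prev + (j.toNat + 5) : Nat) : Int)
            :: PySem.List.pyRange (((prev + (j.toNat + 5) : Nat) : Int) + 1) (cs.length : Int) 1 := by
        apply PySem.List.pyRange_one_cons; push_cast; omega
      rw [hs1, List.foldl_append, hs2]
      rw [pv_fold_no_cut cs (j.toNat + 5) prev out [] (by omega)
            (fun i ha hb => hnc i ha (by omega))]
      rw [List.foldl_cons]
      have hct' : pvCond cs ((prev + (j.toNat + 5) : Nat) : Int) = true := by
        have hcc : ((prev + (j.toNat + 5) : Nat) : Int) = ((prev + j.toNat + 5 : Nat) : Int) := by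
          push_cast; ring
        rw [hcc]; exact hct
      have hstep : pvStepA cs (out, [] ++ (cs.drop prev).take (j.toNat + 5))
            ((prev + (j.toNat + 5) : Nat) : Int)
          = (out ++ [String.ofList ((cs.drop prev).take (j.toNat + 5))], []) := by
        unfold pvStepA
        rw [hct']
        simp
      rw [hstep]
      -- recurse from prev' = prev + j.toNat + 6
      have hcast1 : (((prev + (j.toNat + 5) : Nat) : Int)) + 1 = ((prev + j.toNat + 6 : Nat) : Int) := by
        push_cast; ring
      rw [hcast1]
      have hinv' : prev + j.toNat + 6 = 0 ∨ cs[(prev + j.toNat + 6) - 1]? = some ' ' := by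
        right
        have hsp : (cs.drop prev).drop j.toNat
            = ".java ".toList ++ ((cs.drop prev).drop j.toNat).drop 6 := by
          obtain ⟨t, ht⟩ := hpre
          rw [← ht]
          simp
        have hc6 : cs[(prev + j.toNat + 6) - 1]? = ((cs.drop prev).drop j.toNat)[5]? := by
          simp only [List.drop_drop, List.getElem?_drop]
          congr 1 <;> omega
        rw [hc6]
        have h5 := congrArg (fun l => l[5]?) hsp
        simp only at h5
        rw [h5, List.getElem?_append_left (by decide)]
        decide
      have hrec := ih (cs.length - (prev + j.toNat + 6)) (by omega) (prev + j.toNat + 6)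
        (out ++ [String.ofList ((cs.drop prev).take (j.toNat + 5))]) rfl (by omega) hinv'
      rw [hrec]
      -- unfold B's splitter once on cs.drop prev
      conv_rhs => rw [divide_link_altLoop.eq_def]
      rw [← hj, dif_neg hf]
      rw [PySem.List.slice_to (cs.drop prev) (by omega : (0:Int) ≤ j + 5),
          PySem.List.slice_from (cs.drop prev) (by omega : (0:Int) ≤ j + 6)]
      have ht5 : (j + 5).toNat = j.toNat + 5 := by omega
      have ht6 : (j + 6).toNat = j.toNat + 6 := by omega
      rw [ht5, ht6]
      have hdd : cs.drop (prev + j.toNat + 6) = ((cs.drop prev)).drop (j.toNat + 6) := by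
        rw [List.drop_drop]; congr 1 <;> omega
      rw [hdd]
      simp

-- ===== VERDICT (by name: the statement is the Claim_ definition above) =====
theorem divide_link_spec : Claim_equal_divide_link := by
  intro input _
  show divide_link input = divide_link_alt input
  have h := pv_main input.toList input.toList.length 0 [] (by omega) (by omega) (Or.inl rfl)
  simp only [Nat.cast_zero, List.drop_zero, List.nil_append] at h
  exact h
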